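-- pv_equiv track=rewrite | github.com/paulklemstine/factor | pvsnp_moonshot_10.py | count_integer_roots
-- ===== SOURCE A (Python) =====
-- def count_integer_roots(coeffs, bound):
--     """Count integer roots of polynomial with given coefficients in [-bound, bound]."""
--     roots = []
--     for x in range(-bound, bound + 1):
--         val = 0
--         xk = 1
--         for c in coeffs:
--             val += c * xk
--             xk *= x
--         if val == 0:
--             roots.append(x)
--     return roots
-- ===== SOURCE B (Python) =====
-- def count_integer_roots(coeffs, bound):
--     """Count integer roots of polynomial with given coefficients in [-bound, bound]."""
--     # strip low-order zero coefficients: poly = x^k * p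
--     k = 0
--     n = len(coeffs)
--     while k < n and coeffs[k] == 0:
--         k += 1
--     p = coeffs[k:]
--     if not p:
--         # zero polynomial: every x is a root
--         return list(range(-bound, bound + 1))
--     c0 = p[0]
--     a = abs(c0)
--     # positive divisors of a via trial division up to sqrt(a)
--     divs = []
--     d = 1
--     while d * d <= a:
--         if a % d == 0:
--             divs.append(d)
--             divs.append(a // d)
--         d += 1
--     cands = set()
--     for d in divs:
--         cands.add(d)
--         cands.add(-d)
--     if k > 0:
--         cands.add(0)
--     roots = []
--     for x in sorted(cands):
--         if -bound <= x <= bound: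
--             if x == 0 or horner(p, x) == 0:
--                 roots.append(x)
--     return roots
--
-- def horner(p, x):
--     v = 0
--     for c in reversed(p):
--         v = v * x + c
--     return v
-- ===== Notes on version B (the rewrite author's own statement) =====
-- stated objective: faster
-- what changed: Instead of testing every x in [-bound, bound], B strips trailing zero coefficients and uses the rational root theorem: it enumerates the divisors of the constant term by trial division up to its square root and tests only those candidates (plus 0), returning them in sorted order; the all-zero polynomial still yields the whole range.
import Mathlib
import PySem

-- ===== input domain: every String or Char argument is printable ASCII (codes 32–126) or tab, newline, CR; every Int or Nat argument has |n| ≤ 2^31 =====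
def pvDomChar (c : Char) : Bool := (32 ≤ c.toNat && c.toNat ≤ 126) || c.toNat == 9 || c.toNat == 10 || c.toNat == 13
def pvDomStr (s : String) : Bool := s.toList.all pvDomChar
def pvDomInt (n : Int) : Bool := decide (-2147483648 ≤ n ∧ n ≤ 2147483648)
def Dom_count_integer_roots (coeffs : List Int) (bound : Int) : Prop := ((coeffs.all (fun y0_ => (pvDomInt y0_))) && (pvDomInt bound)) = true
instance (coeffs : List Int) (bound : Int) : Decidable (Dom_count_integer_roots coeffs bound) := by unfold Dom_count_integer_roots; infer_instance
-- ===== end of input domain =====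

-- B replaces A's scan over every x in [-bound, bound] by the rational-root theorem:
-- only divisors of the trailing nonzero coefficient (plus 0) can be roots; objective: faster.

-- ===== PORT A =====
def count_integer_roots (coeffs : List Int) (bound : Int) : List Int :=
  (PySem.List.pyRange (-bound) (bound + 1) 1).foldl
    (fun roots x =>
      let vx := coeffs.foldl (fun (s : Int × Int) c => (s.1 + c * s.2, s.2 * x)) (0, 1)
      if vx.1 = 0 then roots ++ [x] else roots) []

-- ===== PORT B =====
-- 'while k < n and coeffs[k] == 0: k += 1; p = coeffs[k:]' — returns (k, p)
def stripLow : List Int → Nat → Nat × List Int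
  | [], k => (k, [])
  | c :: cs, k => if c = 0 then stripLow cs (k + 1) else (k, c :: cs)

-- 'd = 1; while d*d <= a: if a % d == 0: divs += [d, a//d]; d += 1' — fuel bounds the loop
def divLoop (a : Int) : Nat → Int → List Int → List Int
  | 0, _, acc => acc
  | fuel + 1, d, acc =>
    if d * d ≤ a then
      divLoop a fuel (d + 1)
        (if PySem.Int.mod a d = 0 then acc ++ [d, PySem.Int.floordiv a d] else acc)
    else acc

def hornerL (p : List Int) (x : Int) : Int :=
  p.reverse.foldl (fun v c => v * x + c) 0

def count_integer_roots_alt (coeffs : List Int) (bound : Int) : List Int :=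
  let kp := stripLow coeffs 0
  match kp.2 with
  | [] => PySem.List.pyRange (-bound) (bound + 1) 1
  | c0 :: _ =>
    let a : Int := |c0|
    let divs := divLoop a (a.toNat + 1) 1 []
    let cands : PySem.Set Int :=
      divs.foldl (fun s d => PySem.Set.add (PySem.Set.add s d) (-d)) PySem.Set.empty
    let cands := if kp.1 > 0 then PySem.Set.add cands 0 else cands
    (PySem.List.sorted cands (fun x => x) false).foldl
      (fun roots x =>
        if -bound ≤ x ∧ x ≤ bound then
          if x = 0 ∨ hornerL kp.2 x = 0 then roots ++ [x] else roots
        else roots) []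

-- ===== PRECONDITION & SPEC =====
def Spec_count_integer_roots (coeffs : List Int) (bound : Int) (out : List Int) : Prop := out = count_integer_roots_alt coeffs bound
instance (coeffs : List Int) (bound : Int) (out : List Int) : Decidable (Spec_count_integer_roots coeffs bound out) := by unfold Spec_count_integer_roots; infer_instance

-- ===== CLAIM (what is proved, stated in full; the proofs are below) =====
def Claim_equal_count_integer_roots : Prop := ∀ (coeffs : List Int) (bound : Int), Dom_count_integer_roots coeffs bound → Spec_count_integer_roots coeffs bound (count_integer_roots coeffs bound)

-- ===== LEMMAS AND PROOFS =====

-- mathematical value of the polynomial (little-endian coefficients)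
def polyVal : List Int → Int → Int
  | [], _ => 0
  | c :: cs, x => c + x * polyVal cs x

theorem polyA_eq (coeffs : List Int) (x v xk : Int) :
    (coeffs.foldl (fun (s : Int × Int) c => (s.1 + c * s.2, s.2 * x)) (v, xk)).1
      = v + xk * polyVal coeffs x := by
  induction coeffs generalizing v xk with
  | nil => simp [polyVal]
  | cons c cs ih => simp [List.foldl, polyVal, ih]; ring

theorem horner_eq_aux (p : List Int) (x v : Int) :
    p.reverse.foldl (fun v c => v * x + c) v = v * x ^ p.length + polyVal p x := by
  induction p generalizing v with
  | nil => simp [polyVal]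
  | cons c cs ih => simp [List.foldl_append, polyVal, ih]; ring

theorem horner_eq (p : List Int) (x : Int) : hornerL p x = polyVal p x := by
  unfold hornerL; rw [horner_eq_aux]; simp

theorem stripLow_spec (cs : List Int) (k : Nat) :
    ∀ x, polyVal cs x = x ^ ((stripLow cs k).1 - k) * polyVal (stripLow cs k).2 x := by
  induction cs generalizing k with
  | nil => intro x; simp [stripLow, polyVal]
  | cons c cs ih =>
    intro x
    by_cases hc : c = 0
    · have h1 : k + 1 ≤ (stripLow cs (k + 1)).1 := by
        clear ih
        induction cs generalizing k with
        | nil => simp [stripLow]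
        | cons d ds ih2 =>
          by_cases hd : d = 0
          · simp only [stripLow, if_pos hd]; have := ih2 (k + 1); omega
          · simp [stripLow, hd]
      have hs : stripLow (c :: cs) k = stripLow cs (k + 1) := by simp [stripLow, hc]
      rw [hs]
      simp only [polyVal, hc]
      rw [ih (k + 1) x]
      have h2 : (stripLow cs (k + 1)).1 - k = ((stripLow cs (k + 1)).1 - (k + 1)) + 1 := by omega
      rw [h2, pow_succ]; ring
    · simp [stripLow, hc]

theorem stripLow_head_ne (cs : List Int) (k : Nat) (c0 : Int) (rest : List Int)
    (h : (stripLow cs k).2 = c0 :: rest) : c0 ≠ 0 := by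
  induction cs generalizing k with
  | nil => simp [stripLow] at h
  | cons c cs ih =>
    by_cases hc : c = 0
    · simp only [stripLow, if_pos hc] at h; exact ih (k + 1) h
    · simp [stripLow, hc] at h; intro h0; exact hc (h.1 ▸ h0)

theorem stripLow_fst_pos_iff (cs : List Int) (hm : 0 < (stripLow cs 0).1) :
    polyVal cs 0 = 0 := by
  rw [stripLow_spec cs 0 0]
  have : (stripLow cs 0).1 - 0 ≠ 0 := by omega
  rw [zero_pow this, zero_mul]

theorem stripLow_fst_zero (cs : List Int) (c0 : Int) (rest : List Int)
    (h : (stripLow cs 0).2 = c0 :: rest) (hm : (stripLow cs 0).1 = 0) :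
    polyVal cs 0 = c0 := by
  rw [stripLow_spec cs 0 0, hm, h]; simp [polyVal]

-- elements produced by the divisor loop are ≥ 1
theorem divLoop_pos (a : Int) :
    ∀ fuel (d : Int) acc, 1 ≤ d → (∀ y ∈ acc, 1 ≤ y) →
      ∀ y ∈ divLoop a fuel d acc, 1 ≤ y := by
  intro fuel
  induction fuel with
  | zero => intro d acc _ hacc y hy; exact hacc y hy
  | succ n ih =>
    intro d acc hd hacc y hy
    simp only [divLoop] at hy
    split at hy
    · rename_i hdd
      refine ih (d + 1) _ (by omega) ?_ y hy
      intro z hz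
      split at hz
      · rename_i hmod
        simp only [List.mem_append, List.mem_cons, List.not_mem_nil, or_false] at hz
        rcases hz with h | h | h
        · exact hacc z h
        · omega
        · subst h
          rw [PySem.Int.floordiv_eq_ediv_of_pos (by omega)]
          rw [Int.le_ediv_iff_mul_le (by omega)]
          have : d ≤ a := le_trans (by nlinarith) hdd
          omega
      · exact hacc z hz
    · exact hacc y hy

-- completeness of the divisor loop
theorem divLoop_complete (a : Int) (ha : 1 ≤ a) (y : Int) :
    ∀ (fuel : Nat) (d : Int) acc, 1 ≤ d → a + 1 ≤ d + (fuel : Int) →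
      (y ∈ acc ∨ (d ≤ y ∧ y ∣ a ∧ y * y ≤ a) ∨
        (∃ t, d ≤ t ∧ t ∣ a ∧ t * t ≤ a ∧ y = a / t)) →
      y ∈ divLoop a fuel d acc := by
  intro fuel
  induction fuel with
  | zero =>
    intro d acc hd hfuel hy
    simp only [divLoop]
    rcases hy with h | ⟨h1, _, h3⟩ | ⟨t, h1, _, h3, _⟩
    · exact h
    · exfalso
      have hya : y ≤ a := le_trans (le_mul_of_one_le_left (by omega) (by omega)) h3
      omega
    · exfalso
      have hta : t ≤ a := le_trans (le_mul_of_one_le_left (by omega) (by omega)) h3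
      omega
  | succ n ih =>
    intro d acc hd hfuel hy
    simp only [divLoop]
    split
    · rename_i hdd
      apply ih (d + 1) _ (by omega) (by omega)
      rcases hy with h | ⟨h1, h2, h3⟩ | ⟨t, h1, h2, h3, h4⟩
      · left
        split
        · simp [h]
        · exact h
      · rcases eq_or_lt_of_le h1 with heq | hlt
        · left
          have hdvd : PySem.Int.mod a d = 0 := by
            rw [PySem.Int.mod_eq_zero_iff_dvd]; exact heq ▸ h2
          rw [if_pos hdvd]
          simp [heq]
        · right; left; exact ⟨by omega, h2, h3⟩
      · rcases eq_or_lt_of_le h1 with heq | hlt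
        · left
          have hdvd : PySem.Int.mod a d = 0 := by
            rw [PySem.Int.mod_eq_zero_iff_dvd]; exact heq ▸ h2
          rw [if_pos hdvd]
          have : PySem.Int.floordiv a d = a / d := PySem.Int.floordiv_eq_ediv_of_pos (by omega)
          simp [h4, ← heq, this]
        · right; right; exact ⟨t, by omega, h2, h3, h4⟩
    · rename_i hdd
      rcases hy with h | ⟨h1, _, h3⟩ | ⟨t, h1, _, h3, _⟩
      · exact h
      · exfalso; nlinarith
      · exfalso; nlinarith

theorem divLoop_mem_of_dvd (a : Int) (ha : 1 ≤ a) (y : Int) (hy : 1 ≤ y) (hdvd : y ∣ a) :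
    y ∈ divLoop a (a.toNat + 1) 1 [] := by
  apply divLoop_complete a ha y (a.toNat + 1) 1 [] le_rfl (by omega)
  by_cases hsq : y * y ≤ a
  · right; left; exact ⟨hy, hdvd, hsq⟩
  · right; right
    obtain ⟨t, ht⟩ := hdvd
    have hypos : 0 < y := by omega
    have htpos : 0 < t := by nlinarith
    refine ⟨t, by omega, ⟨y, by rw [ht]; ring⟩, ?_, ?_⟩
    · nlinarith
    · rw [ht, Int.mul_ediv_cancel _ (by omega : t ≠ 0)]

-- candidate set membership
theorem cands_fold_mem (divs : List Int) (s0 : List Int) (y : Int) :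
    y ∈ divs.foldl (fun s d => PySem.Set.add (PySem.Set.add s d) (-d)) s0 ↔
      y ∈ s0 ∨ y ∈ divs ∨ -y ∈ divs := by
  induction divs generalizing s0 with
  | nil => simp
  | cons d ds ih =>
    simp only [List.foldl, ih, PySem.Set.mem_add, List.mem_cons]
    have hyd : (y = -d) ↔ (-y = d) := by omega
    rw [hyd]
    tauto

theorem cands_fold_nodup (divs : List Int) (s0 : List Int) (h : s0.Nodup) :
    (divs.foldl (fun s d => PySem.Set.add (PySem.Set.add s d) (-d)) s0).Nodup := by
  induction divs generalizing s0 with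
  | nil => exact h
  | cons d ds ih => exact ih _ (PySem.Set.nodup_add _ _ (PySem.Set.nodup_add _ _ h))

-- strictly sorted lists with the same members are equal
theorem sorted_lt_ext : ∀ (l1 l2 : List Int), l1.Pairwise (· < ·) → l2.Pairwise (· < ·) →
    (∀ x, x ∈ l1 ↔ x ∈ l2) → l1 = l2 := by
  intro l1
  induction l1 with
  | nil =>
    intro l2 _ _ hmem
    cases l2 with
    | nil => rfl
    | cons b t2 => exact absurd ((hmem b).mpr (List.mem_cons_self)) (List.not_mem_nil)
  | cons a t1 ih =>
    intro l2 h1 h2 hmem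
    cases l2 with
    | nil => exact absurd ((hmem a).mp (List.mem_cons_self)) (List.not_mem_nil)
    | cons b t2 =>
      have hab : a = b := by
        rcases List.mem_cons.mp ((hmem a).mp List.mem_cons_self) with h | h
        · exact h
        · rcases List.mem_cons.mp ((hmem b).mpr List.mem_cons_self) with h' | h'
          · exact h'.symm
          · have := (List.pairwise_cons.mp h2).1 a h
            have := (List.pairwise_cons.mp h1).1 b h'
            omega
      subst hab
      have ht : ∀ x, x ∈ t1 ↔ x ∈ t2 := by
        intro x
        constructor
        · intro hx
          have hax := (List.pairwise_cons.mp h1).1 x hx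
          rcases List.mem_cons.mp ((hmem x).mp (List.mem_cons_of_mem _ hx)) with h | h
          · omega
          · exact h
        · intro hx
          have hax := (List.pairwise_cons.mp h2).1 x hx
          rcases List.mem_cons.mp ((hmem x).mpr (List.mem_cons_of_mem _ hx)) with h | h
          · omega
          · exact h
      rw [ih t2 (List.pairwise_cons.mp h1).2 (List.pairwise_cons.mp h2).2 ht]

-- A's output is the filter of the range
theorem portA_eq_filter (coeffs : List Int) (bound : Int) :
    count_integer_roots coeffs bound =
      (PySem.List.pyRange (-bound) (bound + 1) 1).filter
        (fun x => decide (polyVal coeffs x = 0)) := by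
  unfold count_integer_roots
  simp only [polyA_eq, zero_add, one_mul]
  have := PySem.List.foldl_append_ite_eq_filter
    (l := PySem.List.pyRange (-bound) (bound + 1) 1)
    (p := fun x => polyVal coeffs x = 0) (acc := ([] : List Int))
  simp only [List.nil_append] at this
  exact this

-- nested range/predicate test inside the foldl is a filter
theorem foldl_range_filter (l : List Int) (bound : Int) (Q : Int → Prop) [DecidablePred Q]
    (acc : List Int) :
    l.foldl (fun roots x =>
        if -bound ≤ x ∧ x ≤ bound then if Q x then roots ++ [x] else roots else roots) acc
      = acc ++ l.filter (fun x => decide ((-bound ≤ x ∧ x ≤ bound) ∧ Q x)) := by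
  have hfun : (fun (roots : List Int) x =>
        if -bound ≤ x ∧ x ≤ bound then if Q x then roots ++ [x] else roots else roots)
      = (fun roots x => if (-bound ≤ x ∧ x ≤ bound) ∧ Q x then roots ++ [x] else roots) := by
    funext roots x
    split_ifs <;> first | rfl | (exfalso; tauto)
  rw [hfun]
  exact PySem.List.foldl_append_ite_eq_filter (l := l)
    (p := fun x => (-bound ≤ x ∧ x ≤ bound) ∧ Q x) (acc := acc)

theorem main_eq (coeffs : List Int) (bound : Int) :
    count_integer_roots coeffs bound = count_integer_roots_alt coeffs bound := by
  rw [portA_eq_filter]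
  rcases hsp : (stripLow coeffs 0).2 with _ | ⟨c0, rest⟩
  · -- zero polynomial: every x in the range is a root
    have hall : ∀ x : Int, polyVal coeffs x = 0 := by
      intro x; rw [stripLow_spec coeffs 0 x, hsp]; simp [polyVal]
    simp [count_integer_roots_alt, hsp, hall]
  · have hc0 : c0 ≠ 0 := stripLow_head_ne coeffs 0 c0 rest hsp
    have hpoly : ∀ x : Int,
        polyVal coeffs x = x ^ ((stripLow coeffs 0).1 - 0) * polyVal (c0 :: rest) x := by
      intro x; rw [stripLow_spec coeffs 0 x, hsp]
    have ha : 1 ≤ |c0| := by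
      have := abs_pos.mpr hc0; omega
    have hdpos : ∀ y ∈ divLoop |c0| (|c0|.toNat + 1) 1 [], 1 ≤ y :=
      divLoop_pos |c0| _ 1 [] le_rfl (by simp)
    have hmemc : ∀ y : Int,
        (y ∈ (if (stripLow coeffs 0).1 > 0
            then PySem.Set.add ((divLoop |c0| (|c0|.toNat + 1) 1 []).foldl
                (fun s d => PySem.Set.add (PySem.Set.add s d) (-d)) PySem.Set.empty) 0
            else (divLoop |c0| (|c0|.toNat + 1) 1 []).foldl
                (fun s d => PySem.Set.add (PySem.Set.add s d) (-d)) PySem.Set.empty)) ↔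
          ((y = 0 ∧ 0 < (stripLow coeffs 0).1) ∨
            y ∈ divLoop |c0| (|c0|.toNat + 1) 1 [] ∨ -y ∈ divLoop |c0| (|c0|.toNat + 1) 1 []) := by
      intro y
      split
      · rename_i h
        rw [PySem.Set.mem_add, cands_fold_mem]
        simp only [PySem.Set.empty, List.not_mem_nil, false_or]
        tauto
      · rename_i h
        rw [cands_fold_mem]
        simp only [PySem.Set.empty, List.not_mem_nil, false_or]
        constructor
        · tauto
        · rintro ((⟨_, hm⟩) | h | h) <;> tauto
    have hnd : (if (stripLow coeffs 0).1 > 0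
        then PySem.Set.add ((divLoop |c0| (|c0|.toNat + 1) 1 []).foldl
            (fun s d => PySem.Set.add (PySem.Set.add s d) (-d)) PySem.Set.empty) 0
        else (divLoop |c0| (|c0|.toNat + 1) 1 []).foldl
            (fun s d => PySem.Set.add (PySem.Set.add s d) (-d)) PySem.Set.empty).Nodup := by
      have h0 := cands_fold_nodup (divLoop |c0| (|c0|.toNat + 1) 1 []) PySem.Set.empty
        (by simp [PySem.Set.empty])
      split
      · exact PySem.Set.nodup_add _ _ h0
      · exact h0
    -- unfold B to a filter of the sorted candidate list
    simp only [count_integer_roots_alt, hsp, gt_iff_lt]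
    rw [foldl_range_filter]
    simp only [List.nil_append]
    -- both sides are strictly sorted; compare memberships
    apply sorted_lt_ext
    · exact (PySem.List.pairwise_lt_pyRange_one (-bound) (bound + 1)).sublist
        List.filter_sublist
    · have hs := PySem.List.sorted_pairwise (xs :=
        (if 0 < (stripLow coeffs 0).1
          then PySem.Set.add ((divLoop |c0| (|c0|.toNat + 1) 1 []).foldl
              (fun s d => PySem.Set.add (PySem.Set.add s d) (-d)) PySem.Set.empty) 0
          else (divLoop |c0| (|c0|.toNat + 1) 1 []).foldl
              (fun s d => PySem.Set.add (PySem.Set.add s d) (-d)) PySem.Set.empty))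
        (key := fun x => x)
      have hperm := PySem.List.sorted_perm (xs :=
        (if 0 < (stripLow coeffs 0).1
          then PySem.Set.add ((divLoop |c0| (|c0|.toNat + 1) 1 []).foldl
              (fun s d => PySem.Set.add (PySem.Set.add s d) (-d)) PySem.Set.empty) 0
          else (divLoop |c0| (|c0|.toNat + 1) 1 []).foldl
              (fun s d => PySem.Set.add (PySem.Set.add s d) (-d)) PySem.Set.empty))
        (key := fun x => x) (rev := false)
      have hndq : (PySem.List.sorted _ (fun x => x) false).Nodup := hperm.nodup_iff.mpr hnd
      have hne : (PySem.List.sorted _ (fun x => x) false).Pairwise (· ≠ ·) := hndq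
      have hlt := (List.Pairwise.and hs hne).imp
        (fun hab => lt_of_le_of_ne hab.1 hab.2)
      exact hlt.sublist List.filter_sublist
    · intro x
      simp only [List.mem_filter, PySem.List.mem_pyRange_one, PySem.List.mem_sorted,
        decide_eq_true_eq, hmemc, horner_eq]
      constructor
      · rintro ⟨⟨hlo, hhi⟩, hroot⟩
        by_cases hx : x = 0
        · subst hx
          have hm : 0 < (stripLow coeffs 0).1 := by
            by_contra hm0
            have hmz : (stripLow coeffs 0).1 = 0 := by omega
            have := stripLow_fst_zero coeffs c0 rest hsp hmz
            exact hc0 (by omega)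
          exact ⟨Or.inl ⟨rfl, hm⟩, ⟨by omega, by omega⟩, Or.inl rfl⟩
        · have hpx : polyVal (c0 :: rest) x = 0 := by
            have h := hpoly x
            rw [hroot] at h
            have hxm : x ^ ((stripLow coeffs 0).1 - 0) ≠ 0 := pow_ne_zero _ hx
            exact (mul_eq_zero.mp h.symm).resolve_left hxm
          have hdvd : x ∣ c0 := by
            refine ⟨-(polyVal rest x), ?_⟩
            have h := hpx
            simp only [polyVal] at h
            linear_combination h
          have hdvda : x ∣ |c0| := (dvd_abs x c0).mpr hdvd
          refine ⟨?_, ⟨by omega, by omega⟩, Or.inr hpx⟩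
          rcases lt_or_ge 0 x with hxp | hxn
          · exact Or.inr (Or.inl (divLoop_mem_of_dvd |c0| ha x (by omega) hdvda))
          · refine Or.inr (Or.inr (divLoop_mem_of_dvd |c0| ha (-x) (by omega) ?_))
            exact (neg_dvd).mpr hdvda
      · rintro ⟨hc, ⟨hlo, hhi⟩, hroot⟩
        refine ⟨⟨hlo, by omega⟩, ?_⟩
        by_cases hx : x = 0
        · subst hx
          have hm : 0 < (stripLow coeffs 0).1 := by
            rcases hc with ⟨_, hm⟩ | h | h
            · exact hm
            · exact absurd (hdpos 0 h) (by omega)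
            · exact absurd (hdpos 0 (by simpa using h)) (by omega)
          exact stripLow_fst_pos_iff coeffs hm
        · have hpx : polyVal (c0 :: rest) x = 0 := hroot.resolve_left hx
          rw [hpoly x, hpx, mul_zero]

-- ===== VERDICT (by name: the statement is the Claim_ definition above) =====
theorem count_integer_roots_spec : Claim_equal_count_integer_roots := by
  intro coeffs bound _
  unfold Spec_count_integer_roots
  exact main_eq coeffs bound
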